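-- pv_equiv track=rewrite | github.com/pypi-data/pypi-mirror-369 | packages/obis/obis-0.4.7.tar.gz/obis-0.4.7/obis/scripts/cli.py | _encode_json
-- ===== SOURCE A (Python) =====
-- def _encode_json(value):
--     encoded = ''
--     SEEK = 0
--     ENCODE = 1
--     mode = SEEK
--     for char in value:
--         if char == '{':
--             mode = ENCODE
--         elif char == '}':
--             mode = SEEK
--         if mode == SEEK:
--             encoded += char
--         elif mode == ENCODE:
--             encoded += char.replace(',', '|')
--     return encoded
-- ===== SOURCE B (Python) =====
-- import re
--
--
-- def _encode_json(value):
--     # Each region starts at '{' and runs over every following non-'}' char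
--     # (nesting irrelevant, unclosed regions extend to end of string); commas
--     # inside a region become pipes.
--     return re.sub(r'\{[^}]*', lambda m: m.group().replace(',', '|'), value)
-- ===== Notes on version B (the rewrite author's own statement) =====
-- stated objective: idiomatic
-- what changed: Replaced the explicit per-character mode-flag state machine with a single re.sub over regions matched by \{[^}]* , piping commas inside each matched region via a callback.
import Mathlib
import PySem

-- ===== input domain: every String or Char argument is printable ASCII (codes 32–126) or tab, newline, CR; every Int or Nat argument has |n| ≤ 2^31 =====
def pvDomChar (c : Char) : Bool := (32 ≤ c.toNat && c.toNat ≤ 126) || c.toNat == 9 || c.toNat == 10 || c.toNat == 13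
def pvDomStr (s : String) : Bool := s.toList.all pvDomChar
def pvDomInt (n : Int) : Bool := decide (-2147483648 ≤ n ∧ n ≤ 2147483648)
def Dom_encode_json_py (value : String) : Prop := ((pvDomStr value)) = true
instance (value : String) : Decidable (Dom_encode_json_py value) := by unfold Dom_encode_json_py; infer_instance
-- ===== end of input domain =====

-- B replaces A's per-character mode-flag loop with one regex substitution over
-- brace-opened regions (objective: idiomatic).


-- ===== PORT A =====
-- literal transliteration: fold over the characters carrying (encoded, mode),
-- SEEK = 0, ENCODE = 1; single-char `char.replace(',', '|')`.
def encode_json_py (value : String) : String :=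
  String.ofList
    (value.toList.foldl
      (fun (st : List Char × Nat) char =>
        let mode := if char = '{' then 1 else if char = '}' then 0 else st.2
        if mode = 0 then (st.1 ++ [char], mode)
        else (st.1 ++ [if char = ',' then '|' else char], mode))
      ([], 0)).1

-- ===== PORT B =====
-- `m.group().replace(',', '|')`, the regex callback, on a single char
def pvPipe (c : Char) : Char := if c = ',' then '|' else c

-- hand port of `re.sub(r'\{[^}]*', cb, value)` (regex is not in PySem): scan
-- for the next '{'; the match is that '{' plus the maximal run of non-'}'
-- characters; apply the callback to the match; continue after it. Exact for
-- this pattern because its matches are exactly those segments.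
def pvSub : List Char → List Char
  | [] => []
  | c :: cs =>
    if c = '{' then
      (c :: cs.takeWhile (· ≠ '}')).map pvPipe ++ pvSub (cs.dropWhile (· ≠ '}'))
    else c :: pvSub cs
  termination_by cs => cs.length
  decreasing_by
    · exact Nat.lt_succ_of_le (List.length_dropWhile_le _ cs)
    · exact Nat.lt_succ_self _

def encode_json_py_alt (value : String) : String :=
  String.ofList (pvSub value.toList)

-- ===== PRECONDITION & SPEC =====
def Spec_encode_json_py (value : String) (out : String) : Prop := out = encode_json_py_alt value
instance (value : String) (out : String) : Decidable (Spec_encode_json_py value out) := by unfold Spec_encode_json_py; infer_instance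

-- ===== CLAIM (what is proved, stated in full; the proofs are below) =====
def Claim_equal_encode_json_py : Prop := ∀ (value : String), Dom_encode_json_py value → Spec_encode_json_py value (encode_json_py value)

-- ===== LEMMAS AND PROOFS =====

-- A's loop as a structural recursion on the remaining characters
def pvRunA (mode : Nat) : List Char → List Char
  | [] => []
  | c :: cs =>
    let m := if c = '{' then 1 else if c = '}' then 0 else mode
    (if m = 0 then c else pvPipe c) :: pvRunA m cs

theorem pvFoldl_runA (cs : List Char) : ∀ (acc : List Char) (mode : Nat),
    (cs.foldl
      (fun (st : List Char × Nat) char =>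
        let m := if char = '{' then 1 else if char = '}' then 0 else st.2
        if m = 0 then (st.1 ++ [char], m)
        else (st.1 ++ [if char = ',' then '|' else char], m))
      (acc, mode)).1 = acc ++ pvRunA mode cs := by
  induction cs with
  | nil => intro acc mode; simp [pvRunA]
  | cons c cs ih =>
    intro acc mode
    simp only [List.foldl_cons, pvRunA]
    by_cases h1 : c = '{'
    · simp [h1, ih, pvPipe]
    · by_cases h2 : c = '}'
      · simp [h2, ih]
      · by_cases h3 : mode = 0
        · simp [h1, h2, h3, ih]
        · simp [h1, h2, h3, ih, pvPipe]

theorem pvRunA_one (cs : List Char) :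
    pvRunA 1 cs = (cs.takeWhile (· ≠ '}')).map pvPipe
      ++ pvRunA 0 (cs.dropWhile (· ≠ '}')) := by
  induction cs with
  | nil => simp [pvRunA]
  | cons c cs ih =>
    by_cases h2 : c = '}'
    · simp [pvRunA, h2]
    · by_cases h1 : c = '{'
      · simp [pvRunA, h1, List.takeWhile_cons, List.dropWhile_cons, ih]
      · simp [pvRunA, h1, h2, List.takeWhile_cons, List.dropWhile_cons, ih]

theorem pvRunA_zero (cs : List Char) : pvRunA 0 cs = pvSub cs := by
  induction cs using pvSub.induct with
  | case1 => simp [pvRunA, pvSub]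
  | case2 cs ih =>
    simp only [decide_not] at ih
    rw [pvSub, if_pos rfl]
    simp [pvRunA, pvRunA_one, ih, pvPipe]
  | case3 c cs h ih =>
    rw [pvSub, if_neg h]
    by_cases h2 : c = '}'
    · simp [pvRunA, h2, ih]
    · simp [pvRunA, h, h2, ih]

-- ===== VERDICT (by name: the statement is the Claim_ definition above) =====
theorem encode_json_py_spec : Claim_equal_encode_json_py := by
  intro value _
  unfold Spec_encode_json_py encode_json_py encode_json_py_alt
  rw [pvFoldl_runA, pvRunA_zero]
  rfl
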